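-- pv_equiv track=rewrite | github.com/Brick-Briceno/SBR | compiler.py | there_are_operators_in_groups
-- ===== SOURCE A (Python) =====
-- class syntax_data:
--     #operators
--     math = set("+-")
--     #data types caracteres
--     numbers = ".-0123456789"
--     numbers_with_operators = ".0123456789+-*/~^&%()"
--     tones = "|b#-0123456789"
--     rhythms = "0123456789"
--     all_data = set(numbers+tones+rhythms)
--
-- def there_are_operators_in_groups(code: str):
--     _code = ""
--     if "{" in code and any([y in code for y in syntax_data.math]):
--         for x in code:
--             if "{" == x:
--                 _code += "{("
--             elif ";" == x:
--                 _code += ");("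
--             elif "}" == x:
--                 _code += ")}"
--             else: _code += x
--     else: return code
--     return _code.replace("()", "")
-- ===== SOURCE B (Python) =====
-- def there_are_operators_in_groups(code: str):
--     if "{" in code and ("+" in code or "-" in code):
--         return (code.replace("{", "{(")
--                     .replace(";", ");(")
--                     .replace("}", ")}")
--                     .replace("()", ""))
--     return code
-- ===== Notes on version B (the rewrite author's own statement) =====
-- stated objective: simpler
-- what changed: The hand-written per-character accumulation loop is replaced by a chain of four whole-string str.replace passes (open brace, semicolon, close brace, then removal of empty parens), equivalent because no replacement introduces a character targeted by a later pass.
import Mathlib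
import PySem

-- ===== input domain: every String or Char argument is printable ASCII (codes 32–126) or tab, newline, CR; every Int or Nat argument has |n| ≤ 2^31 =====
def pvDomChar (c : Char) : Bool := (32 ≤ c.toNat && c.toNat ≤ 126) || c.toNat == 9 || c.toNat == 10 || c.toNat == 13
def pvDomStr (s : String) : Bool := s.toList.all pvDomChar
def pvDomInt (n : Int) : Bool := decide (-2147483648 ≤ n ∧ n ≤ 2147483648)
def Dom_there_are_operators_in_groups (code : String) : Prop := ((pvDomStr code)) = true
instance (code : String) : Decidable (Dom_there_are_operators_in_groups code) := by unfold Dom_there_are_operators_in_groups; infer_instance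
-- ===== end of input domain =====

-- B replaces A's per-character accumulation loop by a chain of whole-string replace passes (objective: simpler).

-- ===== PORT A =====
def there_are_operators_in_groups (code : String) : String :=
  if PySem.Str.isIn "{" code && (PySem.Str.isIn "+" code || PySem.Str.isIn "-" code) then
    -- the loop 'for x in code: _code += …' as a foldl over the characters
    let built : List Char := code.toList.foldl (fun acc x =>
      if x = '{' then acc ++ ['{', '(']
      else if x = ';' then acc ++ [')', ';', '(']
      else if x = '}' then acc ++ [')', '}']
      else acc ++ [x]) []
    PySem.Str.replace (String.ofList built) "()" ""
  else code

-- ===== PORT B =====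
def there_are_operators_in_groups_alt (code : String) : String :=
  if PySem.Str.isIn "{" code && (PySem.Str.isIn "+" code || PySem.Str.isIn "-" code) then
    PySem.Str.replace
      (PySem.Str.replace (PySem.Str.replace (PySem.Str.replace code "{" "{(") ";" ");(") "}" ")}")
      "()" ""
  else code

-- ===== PRECONDITION & SPEC =====
def Spec_there_are_operators_in_groups (code : String) (out : String) : Prop := out = there_are_operators_in_groups_alt code
instance (code : String) (out : String) : Decidable (Spec_there_are_operators_in_groups code out) := by unfold Spec_there_are_operators_in_groups; infer_instance

-- ===== CLAIM (what is proved, stated in full; the proofs are below) =====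
def Claim_equal_there_are_operators_in_groups : Prop := ∀ (code : String), Dom_there_are_operators_in_groups code → Spec_there_are_operators_in_groups code (there_are_operators_in_groups code)

-- ===== LEMMAS AND PROOFS =====

-- single-character replace is an independent per-character substitution
theorem replace_go_single (c : Char) (new : List Char) :
    ∀ (l : List Char) (fuel : Nat) (acc : List Char), l.length ≤ fuel →
      PySem.Chars.replace.go [c] new fuel l acc
        = acc.reverse ++ l.flatMap (fun x => if x = c then new else [x]) := by
  intro l
  induction l with
  | nil =>
      intro fuel acc _
      cases fuel <;> simp [PySem.Chars.replace.go]
  | cons x t ih =>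
      intro fuel acc h
      cases fuel with
      | zero => simp at h
      | succ f =>
        by_cases hx : x = c
        · subst hx
          have e : PySem.Chars.replace.go [x] new (f+1) (x :: t) acc
              = PySem.Chars.replace.go [x] new f t (new.reverse ++ acc) := by
            simp [PySem.Chars.replace.go, List.isPrefixOf]
          rw [e, ih f (new.reverse ++ acc) (by simpa using h)]
          simp
        · have e : PySem.Chars.replace.go [c] new (f+1) (x :: t) acc
              = PySem.Chars.replace.go [c] new f t (x :: acc) := by
            simp [PySem.Chars.replace.go, List.isPrefixOf]
            intro hc; exact absurd hc.symm hx
          rw [e, ih f (x :: acc) (by simpa using h)]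
          simp [hx]

theorem replace_single (c : Char) (new l : List Char) :
    PySem.Chars.replace l [c] new = l.flatMap (fun x => if x = c then new else [x]) := by
  have := replace_go_single c new l l.length [] (le_refl _)
  simpa [PySem.Chars.replace] using this

theorem there_are_operators_in_groups_spec : Claim_equal_there_are_operators_in_groups := by
  intro code _
  unfold Spec_there_are_operators_in_groups
  unfold there_are_operators_in_groups there_are_operators_in_groups_alt
  by_cases hcond : (PySem.Str.isIn "{" code && (PySem.Str.isIn "+" code || PySem.Str.isIn "-" code)) = true
  · rw [if_pos hcond, if_pos hcond]
    have hl : (String.ofList (code.toList.foldl (fun acc x =>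
        if x = '{' then acc ++ ['{', '(']
        else if x = ';' then acc ++ [')', ';', '(']
        else if x = '}' then acc ++ [')', '}']
        else acc ++ [x]) [])).toList
        = (PySem.Str.replace (PySem.Str.replace (PySem.Str.replace code "{" "{(") ";" ");(") "}" ")}").toList := by
      rw [String.toList_ofList, PySem.Str.toList_replace, PySem.Str.toList_replace,
        PySem.Str.toList_replace]
      rw [show ("{".toList) = ['{'] from rfl, show (";".toList) = [';'] from rfl,
        show ("}".toList) = ['}'] from rfl]
      rw [replace_single, replace_single, replace_single, List.flatMap_assoc, List.flatMap_assoc]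
      rw [show (fun (acc : List Char) (x : Char) =>
          if x = '{' then acc ++ ['{', '(']
          else if x = ';' then acc ++ [')', ';', '(']
          else if x = '}' then acc ++ [')', '}']
          else acc ++ [x])
        = (fun acc x => acc ++ (if x = '{' then ['{', '(']
          else if x = ';' then [')', ';', '(']
          else if x = '}' then [')', '}']
          else [x])) from by funext acc x; split_ifs <;> rfl]
      rw [PySem.List.foldl_append_eq_flatMap]
      rw [List.nil_append]
      refine congrArg code.toList.flatMap (funext fun x => ?_)
      by_cases h1 : x = '{' <;> by_cases h2 : x = ';' <;> by_cases h3 : x = '}' <;>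
        simp_all
    exact congrArg (fun s => PySem.Str.replace s "()" "") (String.ext hl)
  · rw [if_neg hcond, if_neg hcond]
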